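-- pv_equiv track=rewrite | github.com/d89012255/asr_demo1218 | predict_speech_file11.py | post_process_3
-- ===== SOURCE A (Python) =====
-- def post_process_3(input):
--     second_record = ["i","e","i"]
--     third_record = ["i","an","i"]
--     forth_record = ["i","s","i","i"]
--     fifth_record = ["i","w","u","i"]
--     sixth_record = ["i","l","iu","i"]
--     seventh_record = ["i","i","i"]
--     eighth_record = ["i","a","i"]
--     ninth_record = ["i","iu","i"]
--
--
--
--
--
--     first_record = ["i","yi","i"]
--     mix = [second_record,third_record,forth_record,fifth_record,sixth_record, ninth_record,first_record,seventh_record,eighth_record]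
--     table= ["第二筆","第三筆","第四筆","第五筆","第六筆","第九筆","第一筆","第七筆","第八筆"]
--     all = ""
--     for i in range(len(input)):
--         all+=(input[i][:-1]+" ")
--     temp_for_check = all
--     for i in range(len(mix)):
--         temp_for_check = all
--         for b in range(len(mix[i])):
--
--             if(mix[i][b] in temp_for_check):
--                 temp_for_check = temp_for_check[temp_for_check.find(mix[i][b])+len(mix[i][b]):]
--
--                 if(b==len(mix[i])-1):
--                     return str(table[i])
--             else:
--                 break
--             continue
--     return "無法辨識"
-- ===== SOURCE B (Python) =====
-- def post_process_3(input):
--     table = {"i e i": "第二筆", "i an i": "第三筆", "i s i i": "第四筆",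
--              "i w u i": "第五筆", "i l iu i": "第六筆", "i iu i": "第九筆",
--              "i yi i": "第一筆", "i i i": "第七筆", "i a i": "第八筆"}
--
--     def matches(toks, s):
--         # greedy ordered-substring test: step one character at a time,
--         # consuming the next token whenever it starts at the cursor
--         i = 0
--         while toks:
--             t = toks[0]
--             if s.startswith(t, i):
--                 i += len(t)
--                 toks = toks[1:]
--             elif i < len(s):
--                 i += 1
--             else:
--                 return False
--         return True
--
--     glued = "".join(seg[:-1] + " " for seg in input)
--     return next((label for pattern, label in table.items()
--                  if matches(pattern.split(), glued)), "無法辨識")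
-- ===== Notes on version B (the rewrite author's own statement) =====
-- stated objective: alternative
-- what changed: A glues with an index/accumulator loop and matches each pattern with a find/slice cursor (jump to the first occurrence and cut it off); B stores the patterns as a space-separated-string dict, glues with a join, matches by a character-stepping greedy state machine (advance one char, or consume the next token when it is a prefix), and picks the first matching label with next() over the dict items.
import Mathlib
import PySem

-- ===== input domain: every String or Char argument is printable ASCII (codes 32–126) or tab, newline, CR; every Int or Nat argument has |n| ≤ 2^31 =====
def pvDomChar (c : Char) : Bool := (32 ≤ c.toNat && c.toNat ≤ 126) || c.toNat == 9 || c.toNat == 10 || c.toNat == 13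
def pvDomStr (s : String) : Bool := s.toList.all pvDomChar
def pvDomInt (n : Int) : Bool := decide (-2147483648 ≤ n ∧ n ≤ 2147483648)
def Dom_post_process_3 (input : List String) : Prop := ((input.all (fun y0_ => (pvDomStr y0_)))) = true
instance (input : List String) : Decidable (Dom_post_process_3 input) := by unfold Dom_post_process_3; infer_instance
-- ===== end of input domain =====

-- B replaces A's find/slice cursor matcher with a character-stepping greedy state machine over
-- space-separated pattern strings, and the outer loop with a first-match search (alternative algorithm).
-- Both ports represent the Python strings being scanned as code-point lists (List Char), exact
-- under the type convention.

-- ===== PORT A =====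
-- the fixed pattern/label table of A, patterns as code-point lists
def pvMixA : List (List (List Char) × String) :=
  [([['i'],['e'],['i']], "第二筆"), ([['i'],['a','n'],['i']], "第三筆"),
   ([['i'],['s'],['i'],['i']], "第四筆"), ([['i'],['w'],['u'],['i']], "第五筆"),
   ([['i'],['l'],['i','u'],['i']], "第六筆"), ([['i'],['i','u'],['i']], "第九筆"),
   ([['i'],['y','i'],['i']], "第一筆"), ([['i'],['i'],['i']], "第七筆"),
   ([['i'],['a'],['i']], "第八筆")]

-- A's glue loop: all += input[i][:-1] + " "
def pvGlueA (input : List String) : List Char :=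
  input.foldl (fun acc s => acc ++ PySem.Chars.slice s.toList none (some (-1)) ++ [' ']) []

-- A's inner loop over one pattern: if tok in temp, advance past first occurrence; return on last token; else break
def pvAInner : List (List Char) → List Char → Bool
  | [], _ => false
  | t :: ts, temp =>
    if PySem.Chars.isIn t temp then
      let temp' := PySem.Chars.slice temp (some (PySem.Chars.find temp t + (t.length : Int))) none
      if ts = [] then true else pvAInner ts temp'
    else false

-- A's outer loop over the records; falls through to the fallback label
def pvAOuter : List (List (List Char) × String) → List Char → String
  | [], _ => "無法辨識"
  | (pat, lab) :: rest, al => if pvAInner pat al then lab else pvAOuter rest al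

def post_process_3 (input : List String) : String :=
  pvAOuter pvMixA (pvGlueA input)

-- ===== PORT B =====
-- B's table: pattern as one space-separated string, label
def pvTableB : List (String × String) :=
  [("i e i", "第二筆"), ("i an i", "第三筆"), ("i s i i", "第四筆"),
   ("i w u i", "第五筆"), ("i l iu i", "第六筆"), ("i iu i", "第九筆"),
   ("i yi i", "第一筆"), ("i i i", "第七筆"), ("i a i", "第八筆")]

-- B's matcher loop: cursor i into s; consume the next token when it starts at the cursor,
-- else step one character (s.startswith(t, i) with 0 ≤ i ≤ len(s) is 'prefix of s.drop i', exact)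
def pvMatch : List (List Char) → List Char → Nat → Bool
  | [], _, _ => true
  | t :: ts, s, i =>
    if PySem.Chars.startswith (s.drop i) t then pvMatch ts s (i + t.length)
    else if i < s.length then pvMatch (t :: ts) s (i + 1)
    else false
termination_by toks s i => toks.length + (s.length - i)
decreasing_by
  · simp; omega
  · simp; omega

-- B's glue: "".join(seg[:-1] + " " for seg in input)
def pvGlueB (input : List String) : List Char :=
  (input.map (fun s => PySem.Chars.slice s.toList none (some (-1)) ++ [' '])).flatten

-- next((label for pattern, label in table.items() if matches(pattern.split(), glued)), "無法辨識")
def post_process_3_alt (input : List String) : String :=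
  match pvTableB.find? (fun p => pvMatch (PySem.Chars.split₀ p.1.toList) (pvGlueB input) 0) with
  | some (_, label) => label
  | none => "無法辨識"

-- ===== PRECONDITION & SPEC =====
def Spec_post_process_3 (input : List String) (out : String) : Prop := out = post_process_3_alt input
instance (input : List String) (out : String) : Decidable (Spec_post_process_3 input out) := by unfold Spec_post_process_3; infer_instance

-- ===== CLAIM (what is proved, stated in full; the proofs are below) =====
def Claim_equal_post_process_3 : Prop := ∀ (input : List String), Dom_post_process_3 input → Spec_post_process_3 input (post_process_3 input)

-- ===== LEMMAS AND PROOFS =====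

-- tokens occur in order, as non-overlapping substrings, consumed front to back
def PvOrd : List (List Char) → List Char → Prop
  | [], _ => True
  | t :: ts, s => ∃ a r, s = a ++ t ++ r ∧ PvOrd ts r

theorem pvOrd_left (ts : List (List Char)) (c r : List Char) (h : PvOrd ts r) :
    PvOrd ts (c ++ r) := by
  cases ts with
  | nil => trivial
  | cons t ts =>
    obtain ⟨a, r', hr, ho⟩ := h
    exact ⟨c ++ a, r', by simp [hr], ho⟩

theorem pvAInner_iff : ∀ (toks : List (List Char)) (s : List Char), toks ≠ [] →
    (pvAInner toks s = true ↔ PvOrd toks s) := by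
  intro toks
  induction toks with
  | nil => intro s h; exact absurd rfl h
  | cons t ts ih =>
    intro s _
    by_cases hin : PySem.Chars.isIn t s = true
    · have hj0 : 0 ≤ PySem.Chars.find s t := by
        rw [PySem.Chars.find_nonneg_iff]
        exact (PySem.Chars.isIn_iff_infix t s).mp hin
      obtain ⟨hpre, hmin⟩ := PySem.Chars.find_spec hj0
      set j : Nat := (PySem.Chars.find s t).toNat with hjdef
      have hslice : PySem.Chars.slice s (some (PySem.Chars.find s t + (t.length : Int))) none
          = List.drop (j + t.length) s := by
        rw [PySem.Chars.slice_eq_listSlice, PySem.List.slice_from _ (by positivity)]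
        congr 1
        omega
      obtain ⟨r, hr⟩ := hpre
      have hsplit : s = List.take j s ++ t ++ r := by
        conv_lhs => rw [← List.take_append_drop j s]
        rw [← hr, List.append_assoc]
      have hrdrop : List.drop (j + t.length) s = r := by
        have : List.drop t.length (List.drop j s) = r := by
          rw [← hr, List.drop_append_of_le_length le_rfl]
          simp
        rwa [List.drop_drop] at this
      cases hts : ts with
      | nil =>
        subst hts
        constructor
        · intro _
          exact ⟨List.take j s, r, hsplit, trivial⟩
        · intro _
          simp [pvAInner, hin]
      | cons u us =>
        have htsne : ts ≠ [] := by simp [hts]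
        rw [← hts]
        show (if PySem.Chars.isIn t s then
            (if ts = [] then true
             else pvAInner ts (PySem.Chars.slice s (some (PySem.Chars.find s t + (t.length : Int))) none))
            else false) = true ↔ PvOrd (t :: ts) s
        rw [if_pos hin, if_neg htsne, hslice, ih _ htsne]
        constructor
        · intro ho
          exact ⟨List.take j s, r, hsplit, hrdrop ▸ ho⟩
        · rintro ⟨a, r', hs', ho⟩
          have hja : j ≤ a.length := by
            by_contra hlt
            refine hmin a.length (by omega) ?_
            rw [hs', List.append_assoc, List.drop_append_of_le_length le_rfl]
            simp [List.prefix_append]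
          have : List.drop (j + t.length) s
              = List.drop (j + t.length) (a ++ t) ++ r' := by
            rw [hs', List.drop_append_of_le_length (by simp; omega)]
          rw [this]
          exact pvOrd_left ts _ r' ho
    · have : ¬ t <:+: s := by
        rw [← PySem.Chars.isIn_iff_infix]
        simp [hin]
      constructor
      · intro hfa
        exfalso
        revert hfa
        cases ts <;> simp [pvAInner, hin]
      · rintro ⟨a, r, hs, _⟩
        exact absurd ⟨a, r, by rw [hs, List.append_assoc]⟩ this

-- the one-step unfolding of B's matcher loop
theorem pvMatch_cons (t : List Char) (ts : List (List Char)) (s : List Char) (i : Nat) :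
    pvMatch (t :: ts) s i =
      (if PySem.Chars.startswith (s.drop i) t then pvMatch ts s (i + t.length)
       else if i < s.length then pvMatch (t :: ts) s (i + 1)
       else false) := by
  conv_lhs => rw [pvMatch.eq_def]

-- the cursor matcher decides the ordered-occurrence property on the rest of the string
theorem pvMatch_iff : ∀ (toks : List (List Char)) (s : List Char) (i : Nat),
    (pvMatch toks s i = true ↔ PvOrd toks (s.drop i)) := by
  intro toks s i
  induction hn : toks.length + (s.length - i) using Nat.strong_induction_on generalizing toks i with
  | _ n ih =>
  cases toks with
  | nil => simp [pvMatch, PvOrd]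
  | cons t ts =>
    by_cases hp : PySem.Chars.startswith (s.drop i) t = true
    · have hpre : t <+: s.drop i := (PySem.Chars.startswith_iff _ t).mp hp
      obtain ⟨r, hr⟩ := hpre
      have hdrop : s.drop (i + t.length) = r := by
        rw [← List.drop_drop, ← hr, List.drop_left]
      have hstep : pvMatch (t :: ts) s i = pvMatch ts s (i + t.length) := by
        rw [pvMatch_cons, if_pos hp]
      have hih : pvMatch ts s (i + t.length) = true ↔ PvOrd ts (s.drop (i + t.length)) := by
        refine ih (ts.length + (s.length - (i + t.length))) ?_ ts (i + t.length) rfl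
        subst hn; simp; omega
      rw [hstep, hih, hdrop]
      constructor
      · intro ho
        exact ⟨[], r, by simp [hr.symm], ho⟩
      · rintro ⟨a, r', hsr, ho⟩
        -- r' is a suffix of r = what remains after consuming t at the cursor
        have hsplit2 : r = List.drop t.length (a ++ t) ++ r' := by
          have : (s.drop i).drop t.length = r := by rw [← hr, List.drop_left]
          rw [← this, hsr]
          exact List.drop_append_of_le_length (by simp only [List.length_append]; omega)
        rw [hsplit2]
        exact pvOrd_left ts _ r' ho
    · by_cases hi : i < s.length
      · have hcons : s.drop i = s[i] :: s.drop (i + 1) := List.drop_eq_getElem_cons hi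
        have hstep : pvMatch (t :: ts) s i = pvMatch (t :: ts) s (i + 1) := by
          rw [pvMatch_cons, if_neg hp, if_pos hi]
        have hih : pvMatch (t :: ts) s (i + 1) = true ↔ PvOrd (t :: ts) (s.drop (i + 1)) := by
          refine ih ((t :: ts).length + (s.length - (i + 1))) ?_ _ _ rfl
          subst hn; simp; omega
        rw [hstep, hih]
        constructor
        · rintro ⟨a, r, hsr, ho⟩
          exact ⟨s[i] :: a, r, by simp [hcons, hsr], ho⟩
        · rintro ⟨a, r, hsr, ho⟩
          cases a with
          | nil =>
            exfalso
            apply hp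
            rw [PySem.Chars.startswith_iff, hsr]
            simp [List.prefix_append]
          | cons c' a' =>
            have h0 := hsr
            simp only [List.cons_append, List.append_assoc] at h0
            have h2 : List.drop (i + 1) s = a' ++ (t ++ r) :=
              (List.cons_eq_cons.mp (hcons.symm.trans h0)).2
            exact ⟨a', r, by rw [h2, List.append_assoc], ho⟩
      · have hnil : s.drop i = [] := List.drop_eq_nil_of_le (by omega)
        have : pvMatch (t :: ts) s i = false := by
          rw [pvMatch_cons, if_neg hp, if_neg hi]
        rw [this, hnil]
        simp only [Bool.false_eq_true, false_iff]
        rintro ⟨a, r, hs, -⟩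
        have ht : t = [] := by
          obtain ⟨h1, -⟩ := List.append_eq_nil_iff.mp hs.symm
          exact (List.append_eq_nil_iff.mp h1).2
        rw [hnil, ht] at hp
        simp [PySem.Chars.startswith_iff] at hp

-- A's outer loop is the first-match search, for nonempty patterns
theorem pvOuterA_eq_find : ∀ (L : List (List (List Char) × String)) (g : List Char),
    (∀ p ∈ L, p.1 ≠ []) →
    pvAOuter L g = ((L.find? (fun p => pvMatch p.1 g 0)).map Prod.snd).getD "無法辨識" := by
  intro L
  induction L with
  | nil => intro g _; rfl
  | cons p rest ih =>
    intro g hne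
    obtain ⟨pat, lab⟩ := p
    have hb : pvAInner pat g = pvMatch pat g 0 := by
      have h1 := pvAInner_iff pat g (hne _ List.mem_cons_self)
      have h2 := pvMatch_iff pat g 0
      rw [List.drop_zero] at h2
      cases ha : pvAInner pat g <;> cases hb : pvMatch pat g 0 <;> simp_all
    show (if pvAInner pat g then lab else pvAOuter rest g) = _
    rw [hb, List.find?_cons]
    by_cases hm : pvMatch pat g 0 = true
    · simp [hm]
    · simp only [Bool.not_eq_true] at hm
      simp [hm, ih g (fun q hq => hne q (List.mem_cons_of_mem _ hq))]

theorem pvGlue_eq (input : List String) : pvGlueA input = pvGlueB input := by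
  unfold pvGlueA pvGlueB
  suffices h : ∀ (l : List String) (acc : List Char),
      l.foldl (fun acc s => acc ++ PySem.Chars.slice s.toList none (some (-1)) ++ [' ']) acc
      = acc ++ (l.map (fun s => PySem.Chars.slice s.toList none (some (-1)) ++ [' '])).flatten by
    rw [h input []]
    rfl
  intro l
  induction l with
  | nil => intro acc; simp
  | cons x xs ih =>
    intro acc
    simp only [List.foldl_cons, List.map_cons, List.flatten_cons]
    rw [ih]
    simp [List.append_assoc]

-- A's table is B's table with each pattern string split into its tokens
theorem pvTable_eq :
    pvMixA = pvTableB.map (fun p => (PySem.Chars.split₀ p.1.toList, p.2)) := by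
  decide

-- ===== VERDICT (by name: the statement is the Claim_ definition above) =====
theorem post_process_3_spec : Claim_equal_post_process_3 := by
  intro input _
  show post_process_3 input = post_process_3_alt input
  unfold post_process_3 post_process_3_alt
  rw [pvGlue_eq, pvOuterA_eq_find pvMixA (pvGlueB input) (by decide), pvTable_eq,
    List.find?_map]
  simp only [Function.comp_def]
  cases h : pvTableB.find? (fun p => pvMatch (PySem.Chars.split₀ p.1.toList) (pvGlueB input) 0) with
  | none => simp
  | some q => obtain ⟨a, b⟩ := q; simp
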